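-- pv_equiv track=rewrite | github.com/kataph/ARC_DeepSynth | DSL/write_random_ARC_walks.py | is_rectangular_and_filled
-- ===== SOURCE A (Python) =====
-- def is_rectangular_and_filled(grid):
--     xdim=len(grid)
--     ydim=len(grid[0])
--     for row in grid:
--         if not all(row):
--             return False
--         if not len(row) == ydim:
--             return False
--     return True
-- ===== SOURCE B (Python) =====
-- def is_rectangular_and_filled(grid):
--     ydim = len(grid[0])
--     flat = [c for row in grid for c in row]
--     if len(flat) != len(grid) * ydim:
--         return False
--     if any(len(row) > ydim for row in grid):
--         return False
--     return 0 not in flat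
-- ===== Notes on version B (the rewrite author's own statement) =====
-- stated objective: alternative
-- what changed: Replaced A's early-exit per-row loop (interleaved truthiness and length checks) by a flatten-and-count algorithm: build the flattened cell list once, decide rectangularity arithmetically (total cell count equals rows*len(grid[0]) and no row exceeds len(grid[0])), and decide filledness by '0 not in' the flattened list.
import Mathlib
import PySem

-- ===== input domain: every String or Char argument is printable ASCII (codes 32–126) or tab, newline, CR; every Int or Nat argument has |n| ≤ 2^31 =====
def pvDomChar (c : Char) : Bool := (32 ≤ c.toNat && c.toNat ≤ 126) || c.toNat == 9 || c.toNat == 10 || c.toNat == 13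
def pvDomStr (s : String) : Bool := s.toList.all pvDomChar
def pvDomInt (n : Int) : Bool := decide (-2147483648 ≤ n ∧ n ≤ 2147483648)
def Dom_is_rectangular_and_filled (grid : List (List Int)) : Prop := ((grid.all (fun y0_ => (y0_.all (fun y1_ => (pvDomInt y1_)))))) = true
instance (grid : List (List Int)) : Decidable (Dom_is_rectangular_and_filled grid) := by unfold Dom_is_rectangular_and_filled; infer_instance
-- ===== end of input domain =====

-- B replaces A's early-exit per-row loop by a flatten-and-count algorithm: rectangularity
-- is decided arithmetically (total cell count = rows*ydim and no row longer than ydim),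
-- filledness by membership of 0 in the flattened cell list.


-- ===== PORT A =====
-- for row in grid: if not all(row): return False; if not len(row) == ydim: return False
def isrfA_loop (ydim : Nat) : List (List Int) → Bool
  | [] => true
  | r :: rs =>
    if !(r.all (fun x => x != 0)) then false
    else if !(r.length == ydim) then false
    else isrfA_loop ydim rs

def is_rectangular_and_filled (grid : List (List Int)) : Bool :=
  match grid with
  | [] => false  -- grid[0] raises IndexError in Python; excluded by Pre_
  | g0 :: _ => isrfA_loop g0.length grid

-- ===== PORT B =====
def is_rectangular_and_filled_alt (grid : List (List Int)) : Bool :=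
  match grid with
  | [] => false  -- len(grid[0]) raises IndexError in Python; excluded by Pre_
  | g0 :: _ =>
    let ydim := g0.length
    let flat := grid.flatMap (fun row => row)   -- [c for row in grid for c in row]
    if flat.length != grid.length * ydim then false
    else if grid.any (fun row => decide (row.length > ydim)) then false
    else !(flat.contains (0 : Int))             -- 0 not in flat

-- ===== PRECONDITION & SPEC =====
-- Pre_ excludes only the empty grid, on which the Python A raises IndexError at grid[0].
def Pre_is_rectangular_and_filled (grid : List (List Int)) : Prop := grid ≠ []
instance (grid : List (List Int)) : Decidable (Pre_is_rectangular_and_filled grid) := by unfold Pre_is_rectangular_and_filled; infer_instance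
def pvWitness_is_rectangular_and_filled : List (List Int) := [[1, 2], [3, 4]]

def Spec_is_rectangular_and_filled (grid : List (List Int)) (out : Bool) : Prop := out = is_rectangular_and_filled_alt grid
instance (grid : List (List Int)) (out : Bool) : Decidable (Spec_is_rectangular_and_filled grid out) := by unfold Spec_is_rectangular_and_filled; infer_instance

-- ===== CLAIM (what is proved, stated in full; the proofs are below) =====
def Claim_equal_is_rectangular_and_filled : Prop := ∀ (grid : List (List Int)), Dom_is_rectangular_and_filled grid → Pre_is_rectangular_and_filled grid → Spec_is_rectangular_and_filled grid (is_rectangular_and_filled grid)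

-- ===== LEMMAS AND PROOFS =====

-- A's loop is the conjunction of "all cells truthy" and "every row has length ydim".
theorem isrfA_loop_eq_all (ydim : Nat) (gs : List (List Int)) :
    isrfA_loop ydim gs =
      (gs.all (fun r => r.all (fun x => x != 0)) && gs.all (fun r => r.length == ydim)) := by
  induction gs with
  | nil => rfl
  | cons r rs ih =>
    simp only [isrfA_loop, List.all_cons, ih]
    by_cases h1 : r.all (fun x => x != 0) = true <;>
      by_cases h2 : r.length = ydim <;> simp [h1, h2]

-- sum of a list bounded above by y is at most length * y
theorem sum_le_len_mul (l : List Nat) (y : Nat) (h : ∀ x ∈ l, x ≤ y) :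
    l.sum ≤ l.length * y := by
  induction l with
  | nil => simp
  | cons a rs ih =>
    have ha := h a (List.mem_cons_self ..)
    have := ih (fun x hx => h x (List.mem_cons_of_mem _ hx))
    simp only [List.sum_cons, List.length_cons]
    calc a + rs.sum ≤ y + rs.length * y := Nat.add_le_add ha this
      _ = (rs.length + 1) * y := by ring

-- counting characterisation of rectangularity
theorem count_char (l : List Nat) (y : Nat) :
    (l.sum = l.length * y ∧ ∀ x ∈ l, x ≤ y) ↔ ∀ x ∈ l, x = y := by
  constructor
  · rintro ⟨hsum, hle⟩
    induction l with
    | nil => simp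
    | cons a rs ih =>
      have ha := hle a (List.mem_cons_self ..)
      have hrs := sum_le_len_mul rs y (fun x hx => hle x (List.mem_cons_of_mem _ hx))
      simp only [List.sum_cons, List.length_cons] at hsum
      have hay : a = y := by nlinarith
      intro x hx
      rcases List.mem_cons.mp hx with rfl | hx
      · exact hay
      · exact ih (by nlinarith) (fun z hz => hle z (List.mem_cons_of_mem _ hz)) x hx
  · intro h
    refine ⟨?_, fun x hx => (h x hx).le⟩
    induction l with
    | nil => simp
    | cons a rs ih =>
      simp only [List.sum_cons, List.length_cons,
        ih (fun x hx => h x (List.mem_cons_of_mem _ hx)),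
        h a (List.mem_cons_self ..)]
      ring

-- B equals the same conjunction as A's loop.
theorem alt_eq_all (g0 : List Int) (rest : List (List Int)) :
    is_rectangular_and_filled_alt (g0 :: rest) =
      ((g0 :: rest).all (fun r => r.all (fun x => x != 0)) &&
       (g0 :: rest).all (fun r => r.length == g0.length)) := by
  rw [Bool.eq_iff_iff]
  simp only [is_rectangular_and_filled_alt, Bool.and_eq_true, List.all_eq_true,
    beq_iff_eq, bne_iff_ne, ne_eq]
  set gs := g0 :: rest with hgs
  set y := g0.length
  by_cases hrect : ∀ r ∈ gs, r.length = y
  · have hcnt : (gs.flatMap (fun row => row)).length = gs.length * y := by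
      have := ((count_char (gs.map List.length) y).mpr (by
        intro x hx; rcases List.mem_map.mp hx with ⟨r, hr, rfl⟩; exact hrect r hr)).1
      simpa [List.length_flatMap] using this
    have hany : gs.any (fun row => decide (row.length > y)) = false := by
      simp only [List.any_eq_false, decide_eq_true_eq, not_lt]
      exact fun r hr => (hrect r hr).le
    simp only [hcnt, hany]
    simp [List.contains_eq_mem]
    constructor
    · intro h
      exact ⟨fun r hr x hx hx0 => h r hr (hx0 ▸ hx), hrect⟩
    · rintro ⟨hfill, -⟩ r hr h0
      exact hfill r hr 0 h0 rfl
  · -- not rectangular: B returns false on one of the first two tests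
    have hb : ¬ ((gs.flatMap (fun row => row)).length = gs.length * y ∧
        gs.any (fun row => decide (row.length > y)) = false) := by
      rintro ⟨hcnt, hany⟩
      apply hrect
      have hle : ∀ x ∈ gs.map List.length, x ≤ y := by
        intro x hx; rcases List.mem_map.mp hx with ⟨r, hr, rfl⟩
        simpa using (List.any_eq_false.mp hany r hr)
      have := (count_char (gs.map List.length) y).mp
        ⟨by simpa [List.length_flatMap] using hcnt, hle⟩
      intro r hr
      exact this r.length (List.mem_map.mpr ⟨r, hr, rfl⟩)
    constructor
    · intro h
      exfalso
      split_ifs at h with h1 h2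
      exact hb ⟨by simpa using h1, by simpa using h2⟩
    · rintro ⟨-, hall⟩
      exact absurd hall hrect

-- ===== VERDICT (by name: the statement is the Claim_ definition above) =====
theorem is_rectangular_and_filled_spec : Claim_equal_is_rectangular_and_filled := by
  intro grid _ hpre
  unfold Spec_is_rectangular_and_filled
  match grid with
  | [] => exact absurd rfl hpre
  | g0 :: rest =>
    rw [is_rectangular_and_filled, isrfA_loop_eq_all, alt_eq_all]
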